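-- pv_equiv track=rewrite | github.com/ssi-schaefer/confix | libconfix/plugins/automake/helper.py | format_word_list
-- ===== SOURCE A (Python) =====
-- def format_word_list(words):
--     bare_lines = []
--
--     line = ''
--     for w in words:
--         if len(line) + len(w) + 1 < 70:
--             # word won't overflow the current line; consume word
--             if len(line): line = line + ' ' + w
--             else: line = w
--         else:
--             if len(line) > 0:
--                 # line is already full; flush it and consume word
--                 bare_lines.append(line)
--                 line = w
--             else:
--                 # word is longer than max line length. make a single
--                 # line of it.
--                 line = w
--                 pass
--             pass
--         pass
--
--     if len(line):
--         bare_lines.append(line)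
--         pass
--
--     # prepend spaces to all but the first line. append '\' to all but
--     # the last line. add line to return value.
--
--     ret_lines = []
--
--     for i in range(len(bare_lines)):
--         line = bare_lines[i]
--         if i != 0: line = '    ' + line
--         if i < len(bare_lines)-1:
--             line = line + ' \\'
--         ret_lines.append(line)
--         pass
--
--     return ret_lines
-- ===== SOURCE B (Python) =====
-- def _emit(ret, line):
--     # finalize previous line lazily: it now has a successor, so it gets ' \'
--     if ret:
--         ret[-1] = ret[-1] + ' \\'
--         ret.append('    ' + line)
--     else:
--         ret.append(line)
--
--
-- def format_word_list(words):
--     # single pass: format lines as they are completed; the continuation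
--     # backslash is added to a line only when a later line appears.
--     ret = []
--     line = ''
--     for w in words:
--         if len(line) + len(w) + 1 < 70:
--             line = line + ' ' + w if line else w
--         else:
--             if line:
--                 _emit(ret, line)
--             line = w
--     if line:
--         _emit(ret, line)
--     return ret
-- ===== Notes on version B (the rewrite author's own statement) =====
-- stated objective: simpler
-- what changed: B fuses A's two sequential passes (collect bare lines, then index-loop to add indents/backslashes) into a single pass that formats each line as it is completed, adding the continuation backslash to a line lazily only when a later line appears, so no intermediate bare_lines list and no index arithmetic over it.
import Mathlib
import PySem

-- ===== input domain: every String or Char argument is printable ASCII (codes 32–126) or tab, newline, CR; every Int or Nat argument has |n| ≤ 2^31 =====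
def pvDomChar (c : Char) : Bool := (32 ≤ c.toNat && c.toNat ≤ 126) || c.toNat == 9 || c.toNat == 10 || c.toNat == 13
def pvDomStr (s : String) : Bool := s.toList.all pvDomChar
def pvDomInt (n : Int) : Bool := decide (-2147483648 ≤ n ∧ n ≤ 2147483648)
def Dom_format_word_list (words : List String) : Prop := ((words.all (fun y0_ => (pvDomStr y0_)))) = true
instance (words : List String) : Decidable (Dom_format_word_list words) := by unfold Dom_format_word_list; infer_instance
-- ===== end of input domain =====

-- B fuses wrapping and formatting into one pass (backslash added lazily); same output, different decomposition.

-- ===== PORT A =====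
-- loop body of A's first for-loop, state (bare_lines, line)
def fwlStepA (st : List String × String) (w : String) : List String × String :=
  if st.2.length + w.length + 1 < 70 then
    if st.2.length ≠ 0 then (st.1, st.2 ++ " " ++ w) else (st.1, w)
  else
    if st.2.length > 0 then (st.1 ++ [st.2], w) else (st.1, w)

def format_word_list (words : List String) : List String :=
  let st := words.foldl fwlStepA ([], "")
  let bare := if st.2.length ≠ 0 then st.1 ++ [st.2] else st.1
  -- second loop: for i in range(len(bare_lines))
  (List.range bare.length).foldl (fun ret i =>
    let line := bare.getD i ""
    let line := if i ≠ 0 then "    " ++ line else line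
    let line := if i < bare.length - 1 then line ++ " \\" else line
    ret ++ [line]) []

-- ===== PORT B =====
-- helper _emit of Source B: give the previous last line its continuation backslash, append the new one
def fwlEmit (ret : List String) (line : String) : List String :=
  if ret ≠ [] then ret.dropLast ++ [ret.getLastD "" ++ " \\", "    " ++ line]
  else ret ++ [line]

-- loop body of B's single pass, state (ret, line)
def fwlStepB (st : List String × String) (w : String) : List String × String :=
  if st.2.length + w.length + 1 < 70 then
    (st.1, if st.2.length ≠ 0 then st.2 ++ " " ++ w else w)
  else
    if st.2.length ≠ 0 then (fwlEmit st.1 st.2, w) else (st.1, w)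

def format_word_list_alt (words : List String) : List String :=
  let st := words.foldl fwlStepB ([], "")
  if st.2.length ≠ 0 then fwlEmit st.1 st.2 else st.1

-- ===== PRECONDITION & SPEC =====
def Spec_format_word_list (words : List String) (out : List String) : Prop := out = format_word_list_alt words
instance (words : List String) (out : List String) : Decidable (Spec_format_word_list words out) := by unfold Spec_format_word_list; infer_instance

-- ===== CLAIM (what is proved, stated in full; the proofs are below) =====
def Claim_equal_format_word_list : Prop := ∀ (words : List String), Dom_format_word_list words → Spec_format_word_list words (format_word_list words)

-- ===== LEMMAS AND PROOFS =====

-- the fully formatted rendering of a list of bare lines; the flag says "this is the first line"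
def fwlFmts : Bool → List String → List String
  | _, [] => []
  | f, [l] => [if f then l else "    " ++ l]
  | f, l :: l' :: ls => ((if f then l else "    " ++ l) ++ " \\") :: fwlFmts false (l' :: ls)

lemma fwlFmts_ne_nil (f : Bool) (xs : List String) (h : xs ≠ []) : fwlFmts f xs ≠ [] := by
  cases xs with
  | nil => exact absurd rfl h
  | cons a t => cases t <;> simp [fwlFmts]

lemma fwlEmit_cons (a : String) (t : List String) (y : String) (h : t ≠ []) :
    fwlEmit (a :: t) y = a :: fwlEmit t y := by
  cases t with
  | nil => exact absurd rfl h
  | cons b u => simp [fwlEmit]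

lemma fwlFmts_append (f : Bool) (xs : List String) (y : String) (h : xs = [] → f = true) :
    fwlFmts f (xs ++ [y]) = fwlEmit (fwlFmts f xs) y := by
  induction xs generalizing f with
  | nil => simp [fwlFmts, fwlEmit, h rfl]
  | cons x t ih =>
    cases t with
    | nil => simp [fwlFmts, fwlEmit]
    | cons b u =>
      have h2 : fwlFmts false (b :: u) ≠ [] := fwlFmts_ne_nil _ _ (by simp)
      have hL : fwlFmts f ((x :: b :: u) ++ [y]) =
          ((if f then x else "    " ++ x) ++ " \\") :: fwlFmts false ((b :: u) ++ [y]) := by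
        simp [fwlFmts]
      rw [hL, ih false (by simp), show fwlFmts f (x :: b :: u) =
          ((if f then x else "    " ++ x) ++ " \\") :: fwlFmts false (b :: u) from by simp [fwlFmts],
        fwlEmit_cons _ _ _ h2]

-- index-form body of A's second loop, as left by foldl_append_singleton_eq_map
def fwlG (bs : List String) (i : Nat) : String :=
  let line := bs.getD i ""
  let line := if i ≠ 0 then "    " ++ line else line
  if i < bs.length - 1 then line ++ " \\" else line

lemma fwlG_succ (x : String) (t : List String) (i : Nat) :
    fwlG (x :: t) (i + 1) = ("    " ++ t.getD i "") ++ (if i < t.length - 1 then " \\" else "") := by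
  by_cases h : i + 1 < t.length
  · have h' : i < t.length - 1 := by omega
    simp [fwlG, h, h']
  · have h' : ¬ i < t.length - 1 := by omega
    simp [fwlG, h, h']

lemma fwlMapFalse (t : List String) :
    (List.range t.length).map (fun i => ("    " ++ t.getD i "") ++ (if i < t.length - 1 then " \\" else ""))
      = fwlFmts false t := by
  induction t with
  | nil => simp [fwlFmts]
  | cons y u ih =>
    rw [List.length_cons, List.range_succ_eq_map]
    simp only [List.map_cons, List.map_map]
    simp only [Nat.add_sub_cancel]
    have htl : List.map ((fun i => ("    " ++ (y :: u).getD i "") ++ (if i < u.length then " \\" else "")) ∘ Nat.succ) (List.range u.length)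
        = List.map (fun i => ("    " ++ u.getD i "") ++ (if i < u.length - 1 then " \\" else "")) (List.range u.length) :=
      List.map_congr_left (fun i _ => by
        by_cases hc : i + 1 < u.length
        · have hc' : i < u.length - 1 := by omega
          simp [hc, hc']
        · have hc' : ¬ i < u.length - 1 := by omega
          simp [hc, hc'])
    rw [htl, ih]
    cases u with
    | nil => simp [fwlFmts]
    | cons b v => simp [fwlFmts]

lemma fwlMapTrue (bs : List String) : (List.range bs.length).map (fwlG bs) = fwlFmts true bs := by
  cases bs with
  | nil => simp [fwlFmts]
  | cons x t =>
    rw [List.length_cons, List.range_succ_eq_map]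
    simp only [List.map_cons, List.map_map]
    have htl : List.map (fwlG (x :: t) ∘ Nat.succ) (List.range t.length)
        = List.map (fun i => ("    " ++ t.getD i "") ++ (if i < t.length - 1 then " \\" else "")) (List.range t.length) :=
      List.map_congr_left (fun i _ => fwlG_succ x t i)
    rw [htl, fwlMapFalse]
    cases t with
    | nil => simp [fwlFmts, fwlG]
    | cons b v => simp [fwlFmts, fwlG]

-- A's second loop computes fwlFmts true
lemma fwlFmt2_eq (bs : List String) :
    (List.range bs.length).foldl (fun ret i =>
      let line := bs.getD i ""
      let line := if i ≠ 0 then "    " ++ line else line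
      let line := if i < bs.length - 1 then line ++ " \\" else line
      ret ++ [line]) [] = fwlFmts true bs := by
  have h : (List.range bs.length).foldl (fun ret i => ret ++ [fwlG bs i]) [] = [] ++ (List.range bs.length).map (fwlG bs) :=
    PySem.List.foldl_append_singleton_eq_map (fwlG bs) (List.range bs.length) []
  rw [show (List.range bs.length).foldl (fun ret i =>
      let line := bs.getD i ""
      let line := if i ≠ 0 then "    " ++ line else line
      let line := if i < bs.length - 1 then line ++ " \\" else line
      ret ++ [line]) [] = (List.range bs.length).foldl (fun ret i => ret ++ [fwlG bs i]) [] from rfl,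
    h, List.nil_append, fwlMapTrue]

-- B's loop state mirrors A's: ret is bs fully formatted
lemma fwlLoop (ws : List String) : ∀ (bs : List String) (line : String),
    ws.foldl fwlStepB (fwlFmts true bs, line)
      = (fwlFmts true (ws.foldl fwlStepA (bs, line)).1, (ws.foldl fwlStepA (bs, line)).2) := by
  induction ws with
  | nil => intro bs line; simp
  | cons w t ih =>
    intro bs line
    simp only [List.foldl_cons]
    by_cases h1 : line.length + w.length + 1 < 70
    · by_cases h2 : line.length ≠ 0 <;> simp [fwlStepA, fwlStepB, h1, h2, ih]
    · by_cases h2 : line.length ≠ 0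
      · have h3 : line.length > 0 := Nat.pos_of_ne_zero h2
        have hb : fwlStepB (fwlFmts true bs, line) w = (fwlFmts true (bs ++ [line]), w) := by
          simp [fwlStepB, h1, h2, fwlFmts_append true bs line (fun _ => rfl)]
        have ha : fwlStepA (bs, line) w = (bs ++ [line], w) := by
          simp [fwlStepA, h1, h3]
        rw [hb, ha, ih]
      · have hz : ¬ line.length > 0 := by omega
        simp [fwlStepA, fwlStepB, h1, h2, hz, ih]

-- ===== VERDICT (by name: the statement is the Claim_ definition above) =====
theorem format_word_list_spec : Claim_equal_format_word_list := by
  intro words _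
  show format_word_list words = format_word_list_alt words
  have h := fwlLoop words [] ""
  rw [show fwlFmts true ([] : List String) = [] from rfl] at h
  unfold format_word_list format_word_list_alt
  simp only [h]
  set st := words.foldl fwlStepA ([], "") with hst
  by_cases hl : st.2.length ≠ 0
  · rw [if_pos hl, if_pos hl, fwlFmt2_eq, fwlFmts_append true st.1 st.2 (fun _ => rfl)]
  · rw [if_neg hl, if_neg hl, fwlFmt2_eq]
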